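-- pv_equiv track=rewrite | github.com/xiangfeiye/PN-design | gene_analysis/draw.py | smilereplace
-- ===== SOURCE A (Python) =====
-- def smilereplace(smile):
--     replace_dict = {
--                     'Si': 'V',
--                     "Cl": 'U',
--                     "Br": 'K',
--                     "@@": 'D',
--                     }
--     for key in replace_dict.keys():
--         smile = smile.replace(key, replace_dict[key])
--
--     return smile
-- ===== SOURCE B (Python) =====
-- def smilereplace(smile):
--     mapping = {'Si': 'V', 'Cl': 'U', 'Br': 'K', '@@': 'D'}
--     out = []
--     i = 0
--     n = len(smile)
--     while i < n:
--         pair = smile[i:i + 2]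
--         if pair in mapping:
--             out.append(mapping[pair])
--             i += 2
--         else:
--             out.append(smile[i])
--             i += 1
--     return ''.join(out)
-- ===== Notes on version B (the rewrite author's own statement) =====
-- stated objective: alternative
-- what changed: Replaces four sequential full-string str.replace passes by a single left-to-right tokenizing scan that looks at a 2-char window and maps it through the dict once.
import Mathlib
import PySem

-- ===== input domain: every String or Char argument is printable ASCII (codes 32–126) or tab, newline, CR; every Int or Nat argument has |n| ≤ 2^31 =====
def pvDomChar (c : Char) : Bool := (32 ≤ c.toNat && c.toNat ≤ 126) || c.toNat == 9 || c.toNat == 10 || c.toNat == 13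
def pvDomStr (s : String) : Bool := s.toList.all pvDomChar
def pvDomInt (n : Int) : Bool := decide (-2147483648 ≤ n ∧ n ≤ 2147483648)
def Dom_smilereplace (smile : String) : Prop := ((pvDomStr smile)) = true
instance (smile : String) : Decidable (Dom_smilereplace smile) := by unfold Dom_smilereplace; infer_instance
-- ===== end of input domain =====

-- B replaces A's four sequential str.replace passes by one left-to-right tokenizing
-- scan with a 2-char lookahead; same return value on every input (alternative, not faster).

-- ===== PORT A =====
-- KeyError cannot occur: every key fed to getD comes from d.keys, so the "" default is never used.
def smilereplace (smile : String) : String :=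
  let d : PySem.Dict String String :=
    (((PySem.Dict.empty.insert "Si" "V").insert "Cl" "U").insert "Br" "K").insert "@@" "D"
  d.keys.foldl (fun s key => PySem.Str.replace s key (d.getD key "")) smile

-- ===== PORT B =====
-- transcription of Source B's while-loop over the char list: the chained tests on the first
-- two chars are the 'smile[i:i+2] in mapping' lookup (advance 2 on a hit), the final
-- else is the single-char step (advance 1); the single-char case is i = n-1 where
-- smile[i:i+2] has length 1 and is never a key.
def smilereplaceAltGo : List Char → List Char
  | [] => []
  | [c] => [c]
  | c :: d :: t =>
    if c = 'S' ∧ d = 'i' then 'V' :: smilereplaceAltGo t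
    else if c = 'C' ∧ d = 'l' then 'U' :: smilereplaceAltGo t
    else if c = 'B' ∧ d = 'r' then 'K' :: smilereplaceAltGo t
    else if c = '@' ∧ d = '@' then 'D' :: smilereplaceAltGo t
    else c :: smilereplaceAltGo (d :: t)

def smilereplace_alt (smile : String) : String :=
  String.ofList (smilereplaceAltGo smile.toList)

-- ===== PRECONDITION & SPEC =====
def Spec_smilereplace (smile : String) (out : String) : Prop := out = smilereplace_alt smile
instance (smile : String) (out : String) : Decidable (Spec_smilereplace smile out) := by unfold Spec_smilereplace; infer_instance

-- ===== CLAIM (what is proved, stated in full; the proofs are below) =====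
def Claim_equal_smilereplace : Prop := ∀ (smile : String), Dom_smilereplace smile → Spec_smilereplace smile (smilereplace smile)

-- ===== LEMMAS AND PROOFS =====

/-- One left-to-right greedy replace pass for a 2-char pattern [a,b] ↦ [r]. -/
def rep1 (a b r : Char) : List Char → List Char
  | [] => []
  | [c] => [c]
  | c :: d :: t =>
    if c = a ∧ d = b then r :: rep1 a b r t else c :: rep1 a b r (d :: t)

lemma rep1_cons_of (a b r c : Char) (L : List Char)
    (h : ¬(c = a ∧ L.head? = some b)) :
    rep1 a b r (c :: L) = c :: rep1 a b r L := by
  cases L with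
  | nil => rfl
  | cons d t =>
    simp only [rep1]
    rw [if_neg]
    intro ⟨hc, hd⟩
    exact h ⟨hc, by simp [hd]⟩

lemma rep1_head? (a b r : Char) (L : List Char) :
    (rep1 a b r L).head? = L.head? ∨ (rep1 a b r L).head? = some r := by
  cases L with
  | nil => left; rfl
  | cons c t =>
    cases t with
    | nil => left; rfl
    | cons d t' =>
      simp only [rep1]
      split
      · right; rfl
      · left; rfl

lemma go_spec (a b r : Char) :
    ∀ (fuel : Nat) (l acc : List Char), l.length ≤ fuel →
      PySem.Chars.replace.go [a, b] [r] fuel l acc = acc.reverse ++ rep1 a b r l := by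
  intro fuel
  induction fuel with
  | zero =>
    intro l acc hl
    have : l = [] := List.eq_nil_of_length_eq_zero (Nat.le_zero.mp hl)
    subst this
    simp [PySem.Chars.replace.go, rep1]
  | succ n ih =>
    intro l acc hl
    cases l with
    | nil => simp [PySem.Chars.replace.go, rep1]
    | cons c t =>
      simp only [PySem.Chars.replace.go]
      cases t with
      | nil =>
        rw [if_neg (by simp [List.isPrefixOf])]
        rw [ih [] (c :: acc) (by simp)]
        simp [rep1]
      | cons d t' =>
        by_cases h : c = a ∧ d = b
        · obtain ⟨hc, hd⟩ := h; subst hc; subst hd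
          rw [if_pos (by simp [List.isPrefixOf])]
          simp only [List.length_cons, List.length_nil, List.drop]
          rw [ih t' ([r].reverse ++ acc) (by simp at hl; omega)]
          simp [rep1]
        · rw [if_neg (by simp [List.isPrefixOf]; intro h1 h2; exact h ⟨h1.symm, h2.symm⟩)]
          rw [ih (d :: t') (c :: acc) (by simp at hl ⊢; omega)]
          rw [rep1_cons_of a b r c (d :: t') (by simpa using h)]
          simp

lemma replace_eq_rep1 (a b r : Char) (l : List Char) :
    PySem.Chars.replace l [a, b] [r] = rep1 a b r l := by
  have := go_spec a b r l.length l [] (le_refl _)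
  simpa [PySem.Chars.replace] using this

/-- A's four passes, composed, over List Char. -/
def chainL (l : List Char) : List Char :=
  rep1 '@' '@' 'D' (rep1 'B' 'r' 'K' (rep1 'C' 'l' 'U' (rep1 'S' 'i' 'V' l)))

lemma smilereplace_eq_chain (s : String) :
    smilereplace s = String.ofList (chainL s.toList) := by
  show String.ofList
      (PySem.Chars.replace
        (String.ofList (PySem.Chars.replace
          (String.ofList (PySem.Chars.replace
            (String.ofList (PySem.Chars.replace s.toList ['S','i'] ['V'])).toList
            ['C','l'] ['U'])).toList
          ['B','r'] ['K'])).toList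
        ['@','@'] ['D'])
      = String.ofList (chainL s.toList)
  simp [replace_eq_rep1, chainL]

lemma chain_eq_altGo : ∀ (n : Nat) (l : List Char), l.length ≤ n →
    chainL l = smilereplaceAltGo l := by
  intro n
  induction n with
  | zero =>
    intro l hl
    have : l = [] := List.eq_nil_of_length_eq_zero (Nat.le_zero.mp hl)
    subst this; rfl
  | succ n ih =>
    intro l hl
    cases l with
    | nil => rfl
    | cons c t =>
    cases t with
    | nil => rfl
    | cons d t' =>
      have ht : t'.length ≤ n := by simp at hl; omega
      have hdt : (d :: t').length ≤ n := by simp at hl ⊢; omega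
      by_cases h1 : c = 'S' ∧ d = 'i'
      · obtain ⟨hc, hd⟩ := h1; subst hc; subst hd
        have : chainL ('S' :: 'i' :: t') = 'V' :: chainL t' := by
          simp only [chainL]
          rw [show rep1 'S' 'i' 'V' ('S' :: 'i' :: t') = 'V' :: rep1 'S' 'i' 'V' t' by simp [rep1],
rep1_cons_of 'C' 'l' 'U' 'V' _ (by rintro ⟨hx, -⟩; exact absurd hx (by decide)),
              rep1_cons_of 'B' 'r' 'K' 'V' _ (by rintro ⟨hx, -⟩; exact absurd hx (by decide)),
              rep1_cons_of '@' '@' 'D' 'V' _ (by rintro ⟨hx, -⟩; exact absurd hx (by decide))]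
        rw [this, ih t' ht]
        simp [smilereplaceAltGo]
      · by_cases h2 : c = 'C' ∧ d = 'l'
        · obtain ⟨hc, hd⟩ := h2; subst hc; subst hd
          have : chainL ('C' :: 'l' :: t') = 'U' :: chainL t' := by
            simp only [chainL]
            rw [rep1_cons_of 'S' 'i' 'V' 'C' _ (by rintro ⟨hx, -⟩; exact absurd hx (by decide)),
                rep1_cons_of 'S' 'i' 'V' 'l' _ (by rintro ⟨hx, -⟩; exact absurd hx (by decide)),
                show rep1 'C' 'l' 'U' ('C' :: 'l' :: rep1 'S' 'i' 'V' t')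
                  = 'U' :: rep1 'C' 'l' 'U' (rep1 'S' 'i' 'V' t') by simp [rep1],
                rep1_cons_of 'B' 'r' 'K' 'U' _ (by rintro ⟨hx, -⟩; exact absurd hx (by decide)),
                rep1_cons_of '@' '@' 'D' 'U' _ (by rintro ⟨hx, -⟩; exact absurd hx (by decide))]
          rw [this, ih t' ht]
          simp [smilereplaceAltGo]
        · by_cases h3 : c = 'B' ∧ d = 'r'
          · obtain ⟨hc, hd⟩ := h3; subst hc; subst hd
            have : chainL ('B' :: 'r' :: t') = 'K' :: chainL t' := by
              simp only [chainL]
              rw [rep1_cons_of 'S' 'i' 'V' 'B' _ (by rintro ⟨hx, -⟩; exact absurd hx (by decide)),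
                  rep1_cons_of 'S' 'i' 'V' 'r' _ (by rintro ⟨hx, -⟩; exact absurd hx (by decide)),
                  rep1_cons_of 'C' 'l' 'U' 'B' _ (by rintro ⟨hx, -⟩; exact absurd hx (by decide)),
                  rep1_cons_of 'C' 'l' 'U' 'r' _ (by rintro ⟨hx, -⟩; exact absurd hx (by decide)),
                  show rep1 'B' 'r' 'K' ('B' :: 'r' :: rep1 'C' 'l' 'U' (rep1 'S' 'i' 'V' t'))
                    = 'K' :: rep1 'B' 'r' 'K' (rep1 'C' 'l' 'U' (rep1 'S' 'i' 'V' t')) by simp [rep1],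
                  rep1_cons_of '@' '@' 'D' 'K' _ (by rintro ⟨hx, -⟩; exact absurd hx (by decide))]
            rw [this, ih t' ht]
            simp [smilereplaceAltGo]
          · by_cases h4 : c = '@' ∧ d = '@'
            · obtain ⟨hc, hd⟩ := h4; subst hc; subst hd
              have : chainL ('@' :: '@' :: t') = 'D' :: chainL t' := by
                simp only [chainL]
                rw [rep1_cons_of 'S' 'i' 'V' '@' _ (by rintro ⟨hx, -⟩; exact absurd hx (by decide)),
                    rep1_cons_of 'S' 'i' 'V' '@' _ (by rintro ⟨hx, -⟩; exact absurd hx (by decide)),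
                    rep1_cons_of 'C' 'l' 'U' '@' _ (by rintro ⟨hx, -⟩; exact absurd hx (by decide)),
                    rep1_cons_of 'C' 'l' 'U' '@' _ (by rintro ⟨hx, -⟩; exact absurd hx (by decide)),
                    rep1_cons_of 'B' 'r' 'K' '@' _ (by rintro ⟨hx, -⟩; exact absurd hx (by decide)),
                    rep1_cons_of 'B' 'r' 'K' '@' _ (by rintro ⟨hx, -⟩; exact absurd hx (by decide)),
                    show rep1 '@' '@' 'D' ('@' :: '@' :: rep1 'B' 'r' 'K' (rep1 'C' 'l' 'U' (rep1 'S' 'i' 'V' t')))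
                      = 'D' :: rep1 '@' '@' 'D' (rep1 'B' 'r' 'K' (rep1 'C' 'l' 'U' (rep1 'S' 'i' 'V' t'))) by simp [rep1]]
              rw [this, ih t' ht]
              simp [smilereplaceAltGo]
            · -- no key matches at this position: every pass lets c through
              have hX1 : (rep1 'S' 'i' 'V' (d :: t')).head? = some d ∨
                         (rep1 'S' 'i' 'V' (d :: t')).head? = some 'V' := by
                rcases rep1_head? 'S' 'i' 'V' (d :: t') with h | h
                · left; rw [h]; rfl
                · right; exact h
              have hX2 : (rep1 'C' 'l' 'U' (rep1 'S' 'i' 'V' (d :: t'))).head? = some d ∨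
                         (rep1 'C' 'l' 'U' (rep1 'S' 'i' 'V' (d :: t'))).head? = some 'V' ∨
                         (rep1 'C' 'l' 'U' (rep1 'S' 'i' 'V' (d :: t'))).head? = some 'U' := by
                rcases rep1_head? 'C' 'l' 'U' (rep1 'S' 'i' 'V' (d :: t')) with h | h
                · rcases hX1 with h' | h'
                  · left; rw [h, h']
                  · right; left; rw [h, h']
                · right; right; exact h
              have hX3 : (rep1 'B' 'r' 'K' (rep1 'C' 'l' 'U' (rep1 'S' 'i' 'V' (d :: t')))).head? = some d ∨
                         (rep1 'B' 'r' 'K' (rep1 'C' 'l' 'U' (rep1 'S' 'i' 'V' (d :: t')))).head? = some 'V' ∨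
                         (rep1 'B' 'r' 'K' (rep1 'C' 'l' 'U' (rep1 'S' 'i' 'V' (d :: t')))).head? = some 'U' ∨
                         (rep1 'B' 'r' 'K' (rep1 'C' 'l' 'U' (rep1 'S' 'i' 'V' (d :: t')))).head? = some 'K' := by
                rcases rep1_head? 'B' 'r' 'K' (rep1 'C' 'l' 'U' (rep1 'S' 'i' 'V' (d :: t'))) with h | h
                · rcases hX2 with h' | h' | h'
                  · left; rw [h, h']
                  · right; left; rw [h, h']
                  · right; right; left; rw [h, h']
                · right; right; right; exact h
              have hchain : chainL (c :: d :: t') = c :: chainL (d :: t') := by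
                simp only [chainL]
                rw [rep1_cons_of 'S' 'i' 'V' c _
                      (by rintro ⟨hc, hh⟩; simp at hh; exact h1 ⟨hc, hh⟩)]
                rw [rep1_cons_of 'C' 'l' 'U' c _
                      (by rintro ⟨hc, hh⟩
                          rcases hX1 with h' | h' <;> rw [h'] at hh <;> simp at hh
                          · exact h2 ⟨hc, hh⟩)]
                rw [rep1_cons_of 'B' 'r' 'K' c _
                      (by rintro ⟨hc, hh⟩
                          rcases hX2 with h' | h' | h' <;> rw [h'] at hh <;> simp at hh
                          · exact h3 ⟨hc, hh⟩)]
                rw [rep1_cons_of '@' '@' 'D' c _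
                      (by rintro ⟨hc, hh⟩
                          rcases hX3 with h' | h' | h' | h' <;> rw [h'] at hh <;> simp at hh
                          · exact h4 ⟨hc, hh⟩)]
              have halt : smilereplaceAltGo (c :: d :: t') = c :: smilereplaceAltGo (d :: t') := by
                simp only [smilereplaceAltGo]
                rw [if_neg h1, if_neg h2, if_neg h3, if_neg h4]
              rw [hchain, halt, ih (d :: t') hdt]

-- ===== VERDICT (by name: the statement is the Claim_ definition above) =====
theorem smilereplace_spec : Claim_equal_smilereplace := by
  intro smile _
  unfold Spec_smilereplace smilereplace_alt
  rw [smilereplace_eq_chain, chain_eq_altGo smile.toList.length _ (le_refl _)]
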